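-- pv_equiv track=rewrite | github.com/pdpino/medical-ai | medai/metrics/report_generation/labeler_correctness/light_labeler.py | clean_sentence
-- ===== SOURCE A (Python) =====
-- _IGNORE_TOKENS = ('END', 'PAD', '.', 'xxxx', '&lt', '/', '(', ')', 'UNK', '-') # ','
--
-- def clean_sentence(sentence):
--     sentence = [
--         token
--         for token in sentence
--         if token not in _IGNORE_TOKENS
--     ]
--     # Remove consecutive equal tokens
--     return [
--         token
--         for i, token in enumerate(sentence)
--         if i == 0 or token != sentence[i-1]
--     ]
-- ===== SOURCE B (Python) =====
-- _IGNORE_TOKENS = ('END', 'PAD', '.', 'xxxx', '&lt', '/', '(', ')', 'UNK', '-') # ','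
--
-- def clean_sentence(sentence):
--     # Single pass: skip ignored tokens, append only when different from the last kept token.
--     result = []
--     last = None
--     for token in sentence:
--         if token in _IGNORE_TOKENS:
--             continue
--         if token != last:
--             result.append(token)
--             last = token
--     return result
-- ===== Notes on version B (the rewrite author's own statement) =====
-- stated objective: simpler
-- what changed: Replaced the two comprehensions (filter pass, then index-based dedup pass over the intermediate list) with one loop that tracks the last kept token and appends or skips in a single traversal.
import Mathlib
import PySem

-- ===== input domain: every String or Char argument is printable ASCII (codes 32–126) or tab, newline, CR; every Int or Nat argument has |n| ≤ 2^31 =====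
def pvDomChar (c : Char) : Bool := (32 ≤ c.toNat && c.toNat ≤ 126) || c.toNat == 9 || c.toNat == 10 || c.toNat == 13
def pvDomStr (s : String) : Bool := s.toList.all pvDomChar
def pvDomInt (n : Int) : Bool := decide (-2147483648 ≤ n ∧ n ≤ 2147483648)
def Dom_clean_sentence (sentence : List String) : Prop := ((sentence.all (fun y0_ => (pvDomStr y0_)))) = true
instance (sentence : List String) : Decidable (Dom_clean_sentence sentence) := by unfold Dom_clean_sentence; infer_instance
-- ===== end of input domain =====

-- B replaces A's two comprehension passes by one loop over the input tracking the last kept token (simpler, single pass).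

-- ===== PORT A =====
def pvIgnoreTokens : List String := ["END", "PAD", ".", "xxxx", "&lt", "/", "(", ")", "UNK", "-"]

-- A: filter comprehension, then an enumerate-based comprehension dropping tokens equal to the previous one.
def clean_sentence (sentence : List String) : List String :=
  let s := sentence.filter (fun token => !(pvIgnoreTokens.contains token))
  ((PySem.List.enumerate s 0).filter
      (fun p => p.1 == 0 || p.2 != PySem.List.pyGetD s (p.1 - 1) "")).map (·.2)

-- ===== PORT B =====
-- B's loop: `last` is Python's `None`-initialised last-kept token (Option String).
def clean_sentence_alt_go (l : List String) (last : Option String) : List String :=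
  match l with
  | [] => []
  | token :: rest =>
    if pvIgnoreTokens.contains token then clean_sentence_alt_go rest last
    else if some token == last then clean_sentence_alt_go rest last
    else token :: clean_sentence_alt_go rest (some token)

def clean_sentence_alt (sentence : List String) : List String :=
  clean_sentence_alt_go sentence none

-- ===== PRECONDITION & SPEC =====
def Spec_clean_sentence (sentence : List String) (out : List String) : Prop := out = clean_sentence_alt sentence
instance (sentence : List String) (out : List String) : Decidable (Spec_clean_sentence sentence out) := by unfold Spec_clean_sentence; infer_instance

-- ===== CLAIM (what is proved, stated in full; the proofs are below) =====
def Claim_equal_clean_sentence : Prop := ∀ (sentence : List String), Dom_clean_sentence sentence → Spec_clean_sentence sentence (clean_sentence sentence)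

-- ===== LEMMAS AND PROOFS =====

-- reference dedup with an optional previous token
def pvDed (last : Option String) : List String → List String
  | [] => []
  | b :: rest => if some b = last then pvDed last rest else b :: pvDed (some b) rest

theorem alt_go_eq_ded (l : List String) (last : Option String) :
    clean_sentence_alt_go l last = pvDed last (l.filter (fun t => !(pvIgnoreTokens.contains t))) := by
  induction l generalizing last with
  | nil => simp [clean_sentence_alt_go, pvDed]
  | cons t rest ih =>
    by_cases hig : t ∈ pvIgnoreTokens
    · simp [clean_sentence_alt_go, hig, ih]
    · by_cases hl : some t = last
      · simp [clean_sentence_alt_go, hig, ih, pvDed, hl]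
      · simp [clean_sentence_alt_go, hig, ih, pvDed, hl]

theorem enumA (pre rest : List String) :
    ((PySem.List.enumerate rest (pre.length : Int)).filter
        (fun p => p.1 == 0 || p.2 != PySem.List.pyGetD (pre ++ rest) (p.1 - 1) "")).map (·.2)
      = pvDed pre.getLast? rest := by
  induction rest generalizing pre with
  | nil => simp [PySem.List.enumerate, pvDed]
  | cons b rest ih =>
    rw [PySem.List.enumerate_cons]
    rcases List.eq_nil_or_concat pre with hpre | ⟨q, a, hpre⟩
    · subst hpre
      have h2 := ih [b]
      norm_num at h2 ⊢
      rw [h2]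
      simp [pvDed]
    · subst hpre
      simp only [List.concat_eq_append]
      have hlen : ((q ++ [a]).length : Int) = (q.length : Int) + 1 := by simp
      have hcond : (fun p : Int × String => p.1 == 0 || p.2 != PySem.List.pyGetD ((q ++ [a]) ++ b :: rest) (p.1 - 1) "") ((((q ++ [a]).length : Int)), b) = (b != a) := by
        simp only [hlen]
        have : ((q.length : Int) + 1 == 0) = false := by simp; omega
        simp [this]
      have h2 := ih ((q ++ [a]) ++ [b])
      have hlen2 : (((q ++ [a]) ++ [b]).length : Int) = ((q ++ [a]).length : Int) + 1 := by simp; omega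
      have happ : ((q ++ [a]) ++ [b]) ++ rest = (q ++ [a]) ++ b :: rest := by simp
      have hlast : ((q ++ [a]) ++ [b]).getLast? = some b := by simp
      rw [hlen2, happ, hlast] at h2
      rw [List.filter_cons]
      simp only [hcond]
      have hlast1 : (q ++ [a]).getLast? = some a := by simp
      by_cases hba : b = a
      · subst hba
        simp only [bne_self_eq_false, Bool.false_eq_true, if_false]
        rw [h2, hlast1]
        simp [pvDed]
      · have hbne : (b != a) = true := by simp [hba]
        rw [hbne, if_pos rfl, List.map_cons, h2, hlast1]
        simp [pvDed, hba]

-- ===== VERDICT (by name: the statement is the Claim_ definition above) =====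
theorem clean_sentence_spec : Claim_equal_clean_sentence := by
  intro sentence _
  unfold Spec_clean_sentence clean_sentence clean_sentence_alt
  rw [alt_go_eq_ded]
  have h := enumA [] (sentence.filter (fun token => !(pvIgnoreTokens.contains token)))
  simpa using h
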